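-- pv_equiv track=rewrite | github.com/kjsu0209/CodingTest | programmers/p12987.py | solution
-- ===== SOURCE A (Python) =====
-- def solution(A, B):
--     answer = 0
--     B = sorted(B)
--     for a in A:
--         start = 0
--         end = len(B)-1
--         value = -1
--         while start <= end:
--             mid = (start+end) // 2
--             if B[mid] <= a:
--                 start = mid + 1
--             else:
--                 value = mid
--                 end = mid - 1
--         if value != -1:
--             del B[value]
--             answer+= 1
--
--     return answer
-- ===== SOURCE B (Python) =====
-- def solution(A, B):
--     A = sorted(A)
--     B = sorted(B)
--     i = j = 0
--     while i < len(A) and j < len(B):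
--         if A[i] < B[j]:
--             i += 1
--         j += 1
--     return i
-- ===== Notes on version B (the rewrite author's own statement) =====
-- stated objective: faster
-- what changed: Replaced the per-element binary search with list deletion over a mutating sorted B by sorting both lists once and counting matches in a single two-pointer merge pass.
import Mathlib
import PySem

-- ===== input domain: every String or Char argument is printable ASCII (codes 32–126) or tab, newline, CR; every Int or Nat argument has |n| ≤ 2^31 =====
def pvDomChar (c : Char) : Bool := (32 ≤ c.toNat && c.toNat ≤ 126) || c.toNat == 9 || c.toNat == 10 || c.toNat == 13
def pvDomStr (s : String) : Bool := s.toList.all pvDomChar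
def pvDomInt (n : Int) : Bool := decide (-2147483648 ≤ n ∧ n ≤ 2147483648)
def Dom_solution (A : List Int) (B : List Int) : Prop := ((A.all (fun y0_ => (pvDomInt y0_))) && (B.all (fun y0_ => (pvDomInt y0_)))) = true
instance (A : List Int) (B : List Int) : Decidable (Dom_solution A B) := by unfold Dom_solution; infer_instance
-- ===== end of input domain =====

-- B changes the algorithm: instead of A's per-element binary search with deletion from a
-- mutating sorted B, B sorts both lists once and counts matches in one two-pointer merge pass.

-- ===== PORT A =====
-- the hand-written while-loop binary search of A (start/end/value state);
-- the `none` arm of the match is unreachable from the loop's actual states (index always valid).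
def bsLoop (bs : List Int) (a : Int) (start end_ value : Int) : Int :=
  if h : start ≤ end_ then
    let mid := PySem.Int.floordiv (start + end_) 2
    match PySem.List.pyGet? bs mid with
    | some b =>
        if b ≤ a then bsLoop bs a (mid + 1) end_ value
        else bsLoop bs a start (mid - 1) mid
    | none => value
  else value
termination_by (end_ + 1 - start).toNat
decreasing_by
  · have := PySem.Int.floordiv_two_mid_bounds (lo := start) (hi := end_) h
    omega
  · have := PySem.Int.floordiv_two_mid_bounds (lo := start) (hi := end_) h
    omega

-- the body of A's for-loop: state = (answer, current B)
def stepA (s : Int × List Int) (a : Int) : Int × List Int :=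
  let value := bsLoop s.2 a 0 (s.2.length - 1) (-1)
  if value ≠ -1 then (s.1 + 1, s.2.eraseIdx value.toNat) else s

def solution (A : List Int) (B : List Int) : Int :=
  (A.foldl stepA (0, PySem.List.sorted B (fun x => x) false)).1

-- ===== PORT B =====
-- the two-pointer while loop of Source B, advancing through both sorted lists
def tpLoop : List Int → List Int → Int
  | [], _ => 0
  | _ :: _, [] => 0
  | a :: as, b :: bs => if a < b then 1 + tpLoop as bs else tpLoop (a :: as) bs
termination_by as bs => bs.length

def solution_alt (A : List Int) (B : List Int) : Int :=
  tpLoop (PySem.List.sorted A (fun x => x) false) (PySem.List.sorted B (fun x => x) false)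

-- ===== PRECONDITION & SPEC =====
def Spec_solution (A : List Int) (B : List Int) (out : Int) : Prop := out = solution_alt A B
instance (A : List Int) (B : List Int) (out : Int) : Decidable (Spec_solution A B out) := by unfold Spec_solution; infer_instance

-- ===== CLAIM (what is proved, stated in full; the proofs are below) =====
def Claim_equal_solution : Prop := ∀ (A : List Int) (B : List Int), Dom_solution A B → Spec_solution A B (solution A B)

-- ===== LEMMAS AND PROOFS =====

-- remove the first element greater than a (none if there is none)
def remFirst : List Int → Int → Option (List Int)
  | [], _ => none
  | b :: bs, a => if a < b then some bs else (remFirst bs a).map (b :: ·)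

-- canonical greedy step
def gstep (s : Int × List Int) (a : Int) : Int × List Int :=
  match remFirst s.2 a with
  | some bs' => (s.1 + 1, bs')
  | none => s

theorem remFirst_eq_findIdx (bs : List Int) (a : Int) :
    remFirst bs a = (bs.findIdx? (fun b => a < b)).map (fun k => bs.eraseIdx k) := by
  induction bs with
  | nil => simp [remFirst]
  | cons b t ih =>
    by_cases h : a < b
    · simp [remFirst, List.findIdx?_cons, h]
    · simp only [remFirst, List.findIdx?_cons, h, ih, Option.map_map, if_false, decide_false]
      cases hf : t.findIdx? (fun b => a < b) <;>
        simp [List.eraseIdx_cons_succ, Function.comp]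

theorem remFirst_sublist {bs bs' : List Int} {a : Int} (h : remFirst bs a = some bs') :
    bs'.Sublist bs := by
  induction bs generalizing bs' with
  | nil => simp [remFirst] at h
  | cons b t ih =>
    by_cases hb : a < b
    · simp [remFirst, hb] at h
      subst h; exact List.sublist_cons_self b t
    · simp [remFirst, hb] at h
      obtain ⟨t', ht', rfl⟩ := h
      exact (ih ht').cons₂ b

theorem gstep_pairwise (s : Int × List Int) (a : Int) (hs : s.2.Pairwise (· ≤ ·)) :
    (gstep s a).2.Pairwise (· ≤ ·) := by
  unfold gstep
  cases h : remFirst s.2 a with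
  | none => exact hs
  | some bs' => exact hs.sublist (remFirst_sublist h)

-- all elements greater than a: remFirst removes the head
theorem remFirst_all_gt (t : List Int) (a : Int) (h : ∀ x ∈ t, a < x) :
    remFirst t a = match t with | [] => none | _ :: t' => some t' := by
  cases t with
  | nil => rfl
  | cons x t' => simp [remFirst, h x (by simp)]

-- head not greater than a: gstep keeps it in place
theorem gstep_cons_le (c : Int) (b : Int) (t : List Int) (a : Int) (h : b ≤ a) :
    gstep (c, b :: t) a = ((gstep (c, t) a).1, b :: (gstep (c, t) a).2) := by
  unfold gstep
  simp only [remFirst, not_lt.mpr h, if_false]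
  cases hf : remFirst t a <;> simp [hf]

theorem gstep_comm_le (c : Int) (bs : List Int) (a1 a2 : Int) (h12 : a1 ≤ a2)
    (hs : bs.Pairwise (· ≤ ·)) :
    gstep (gstep (c, bs) a1) a2 = gstep (gstep (c, bs) a2) a1 := by
  induction bs generalizing c with
  | nil => simp [gstep, remFirst]
  | cons b t ih =>
    have hhead : ∀ x ∈ t, b ≤ x := fun x hx => (List.pairwise_cons.mp hs).1 x hx
    have hst : t.Pairwise (· ≤ ·) := (List.pairwise_cons.mp hs).2
    by_cases h2 : a2 < b
    · have h1 : a1 < b := lt_of_le_of_lt h12 h2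
      have hgt1 : ∀ x ∈ t, a1 < x := fun x hx => lt_of_lt_of_le h1 (hhead x hx)
      have hgt2 : ∀ x ∈ t, a2 < x := fun x hx => lt_of_lt_of_le h2 (hhead x hx)
      have e1 : gstep (c, b :: t) a1 = (c + 1, t) := by simp [gstep, remFirst, h1]
      have e2 : gstep (c, b :: t) a2 = (c + 1, t) := by simp [gstep, remFirst, h2]
      rw [e1, e2]
      cases t with
      | nil => simp [gstep, remFirst]
      | cons x t' =>
        have r1 : remFirst (x :: t') a1 = some t' := by
          simpa using remFirst_all_gt (x :: t') a1 hgt1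
        have r2 : remFirst (x :: t') a2 = some t' := by
          simpa using remFirst_all_gt (x :: t') a2 hgt2
        simp [gstep, r1, r2]
    · by_cases h1 : a1 < b
      · -- a1 < b ≤ a2
        have hble : b ≤ a2 := not_lt.mp h2
        have e1 : gstep (c, b :: t) a1 = (c + 1, t) := by simp [gstep, remFirst, h1]
        rw [e1, gstep_cons_le c b t a2 hble]
        cases hf : remFirst t a2 with
        | none =>
          have : gstep (c, t) a2 = (c, t) := by simp [gstep, hf]
          rw [this]
          simp only
          rw [show gstep ((c : Int), b :: t) a1 = (c + 1, t) from e1]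
          simp [gstep, hf]
        | some t2 =>
          have : gstep (c, t) a2 = (c + 1, t2) := by simp [gstep, hf]
          rw [this]
          simp only
          have : gstep ((c : Int) + 1, b :: t2) a1 = (c + 1 + 1, t2) := by
            simp [gstep, remFirst, h1]
          rw [this]
          simp [gstep, hf]
      · -- b ≤ a1 ≤ a2
        have hb1 : b ≤ a1 := not_lt.mp h1
        have hb2 : b ≤ a2 := not_lt.mp h2
        rw [gstep_cons_le c b t a1 hb1, gstep_cons_le c b t a2 hb2,
          gstep_cons_le _ b _ a2 hb2, gstep_cons_le _ b _ a1 hb1]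
        rw [show ((gstep (c, t) a1).1, (gstep (c, t) a1).2) = gstep (c, t) a1 from rfl,
          show ((gstep (c, t) a2).1, (gstep (c, t) a2).2) = gstep (c, t) a2 from rfl]
        rw [ih c hst]

theorem gstep_comm (s : Int × List Int) (a1 a2 : Int) (hs : s.2.Pairwise (· ≤ ·)) :
    gstep (gstep s a1) a2 = gstep (gstep s a2) a1 := by
  obtain ⟨c, bs⟩ := s
  rcases le_total a1 a2 with h | h
  · exact gstep_comm_le c bs a1 a2 h hs
  · exact (gstep_comm_le c bs a2 a1 h hs).symm

theorem foldl_inv_congr {S α : Type} (f g : S → α → S) (P : S → Prop)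
    (hfg : ∀ s a, P s → f s a = g s a) (hg : ∀ s a, P s → P (g s a)) :
    ∀ (l : List α) (s : S), P s → l.foldl f s = l.foldl g s := by
  intro l
  induction l with
  | nil => intro s _; rfl
  | cons x xs ih =>
    intro s hsP
    simp only [List.foldl_cons, hfg s x hsP]
    exact ih (g s x) (hg s x hsP)

theorem foldl_perm_inv {S α : Type} (f : S → α → S) (P : S → Prop)
    (hcomm : ∀ s a1 a2, P s → f (f s a1) a2 = f (f s a2) a1)
    (hP : ∀ s a, P s → P (f s a)) :
    ∀ {l1 l2 : List α}, l1.Perm l2 → ∀ s, P s → l1.foldl f s = l2.foldl f s := by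
  intro l1 l2 h
  induction h with
  | nil => intro s _; rfl
  | cons x _ ih => intro s hs; simp only [List.foldl_cons]; exact ih (f s x) (hP s x hs)
  | swap x y l =>
    intro s hs
    simp only [List.foldl_cons]
    rw [hcomm s y x hs]
  | trans h1 _ ih1 ih2 =>
    intro s hs
    exact (ih1 s hs).trans (ih2 s hs)

-- a head that no later element of as exceeds never gets removed and never matters
theorem foldl_gstep_cons_irrel (as : List Int) (b : Int) :
    ∀ (c : Int) (t : List Int), (∀ x ∈ as, ¬ x < b) →
      (as.foldl gstep (c, b :: t)).1 = (as.foldl gstep (c, t)).1 := by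
  induction as with
  | nil => intro c t _; rfl
  | cons x xs ih =>
    intro c t hx
    have hxb : b ≤ x := not_lt.mp (hx x (by simp))
    simp only [List.foldl_cons]
    rw [gstep_cons_le c b t x hxb]
    rw [show ((gstep (c, t) x).1, b :: (gstep (c, t) x).2)
        = (((gstep (c, t) x).1 : Int), b :: (gstep (c, t) x).2) from rfl]
    rw [ih _ _ (fun y hy => hx y (by simp [hy]))]

theorem tpLoop_nil_right (as : List Int) : tpLoop as [] = 0 := by
  cases as <;> simp [tpLoop]

theorem foldl_gstep_eq_tp (as : List Int) (bs : List Int) (c : Int)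
    (has : as.Pairwise (· ≤ ·)) (hbs : bs.Pairwise (· ≤ ·)) :
    (as.foldl gstep (c, bs)).1 = c + tpLoop as bs := by
  induction as generalizing bs c with
  | nil => simp [tpLoop]
  | cons a as' iha =>
    have has' : as'.Pairwise (· ≤ ·) := (List.pairwise_cons.mp has).2
    have hale : ∀ x ∈ as', a ≤ x := fun x hx => (List.pairwise_cons.mp has).1 x hx
    induction bs with
    | nil =>
      simp only [List.foldl_cons, tpLoop]
      have : gstep (c, ([] : List Int)) a = (c, []) := by simp [gstep, remFirst]
      rw [this, iha [] c has' (by simp), tpLoop_nil_right]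
    | cons b t ihb =>
      have hst : t.Pairwise (· ≤ ·) := (List.pairwise_cons.mp hbs).2
      by_cases hab : a < b
      · have e : gstep (c, b :: t) a = (c + 1, t) := by simp [gstep, remFirst, hab]
        simp only [List.foldl_cons, e, tpLoop, if_pos hab]
        rw [iha t (c + 1) has' hst]
        ring
      · simp only [List.foldl_cons, tpLoop, if_neg hab]
        rw [gstep_cons_le c b t a (not_lt.mp hab)]
        rw [foldl_gstep_cons_irrel as' b _ _
          (fun x hx => not_lt.mpr (le_trans (not_lt.mp hab) (hale x hx)))]
        have := ihb hst
        simpa only [List.foldl_cons] using this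

theorem findIdx?_first (p : Int → Bool) (bs : List Int) (k : Nat) (hk : k < bs.length)
    (hp : p bs[k] = true) (hl : ∀ i (hi : i < bs.length), i < k → p bs[i] = false) :
    bs.findIdx? p = some k := by
  induction bs generalizing k with
  | nil => simp at hk
  | cons b t ih =>
    cases k with
    | zero => simpa [List.findIdx?_cons] using hp
    | succ k' =>
      have h0 : p b = false := hl 0 (by simp) (by omega)
      rw [List.findIdx?_cons, h0]
      simp only [Bool.false_eq_true, if_false]
      rw [ih k' (by simpa using hk) (by simpa using hp)
        (fun i hi hik => hl (i + 1) (by simpa using hi) (by omega))]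
      rfl

theorem bsLoop_inv (bs : List Int) (a : Int) (hs : bs.Pairwise (· ≤ ·))
    (start end_ value : Int) :
    0 ≤ start →
    (∀ i : Nat, (i : Int) < start → ∀ hi : i < bs.length, bs[i] ≤ a) →
    ((value = -1 ∧ end_ = (bs.length : Int) - 1) ∨
      (value = end_ + 1 ∧ start ≤ value ∧ ∃ hv : value.toNat < bs.length, a < bs[value.toNat])) →
    bsLoop bs a start end_ value =
      (match bs.findIdx? (fun b => a < b) with | some k => (k : Int) | none => -1) := by
  induction start, end_, value using bsLoop.induct bs a with
  | case1 start end_ value h mid b hget hle ih =>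
    intro h0 hlow hval
    have hmid := PySem.Int.floordiv_two_mid_bounds (lo := start) (hi := end_) h
    have hget' : bs[mid.toNat]? = some b := by
      rwa [PySem.List.pyGet?_of_nonneg bs (by omega : (0:Int) ≤ mid)] at hget
    have hmlen : mid.toNat < bs.length := (List.getElem?_eq_some_iff.mp hget').1
    have hbm : bs[mid.toNat] = b := (List.getElem?_eq_some_iff.mp hget').2
    have hget2 : PySem.List.pyGet? bs (PySem.Int.floordiv (start + end_) 2) = some b := hget
    rw [bsLoop]
    simp only [dif_pos h, hget2, if_pos hle]
    apply ih
    · omega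
    · intro i hi hilen
      by_cases hcase : (i : Int) < start
      · exact hlow i hcase hilen
      · have hile : i ≤ mid.toNat := by omega
        rcases Nat.lt_or_eq_of_le hile with hlt | heq
        · have := List.pairwise_iff_getElem.mp hs i mid.toNat hilen hmlen hlt
          calc bs[i] ≤ bs[mid.toNat] := this
            _ = b := hbm
            _ ≤ a := hle
        · subst heq; rw [hbm]; exact hle
    · rcases hval with h1 | ⟨h2a, h2b, h2c⟩
      · exact Or.inl h1
      · exact Or.inr ⟨h2a, by omega, h2c⟩
  | case2 start end_ value h mid b hget hgt ih =>
    intro h0 hlow hval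
    have hmid := PySem.Int.floordiv_two_mid_bounds (lo := start) (hi := end_) h
    have hget' : bs[mid.toNat]? = some b := by
      rwa [PySem.List.pyGet?_of_nonneg bs (by omega : (0:Int) ≤ mid)] at hget
    have hmlen : mid.toNat < bs.length := (List.getElem?_eq_some_iff.mp hget').1
    have hbm : bs[mid.toNat] = b := (List.getElem?_eq_some_iff.mp hget').2
    have hget2 : PySem.List.pyGet? bs (PySem.Int.floordiv (start + end_) 2) = some b := hget
    rw [bsLoop]
    simp only [dif_pos h, hget2, if_neg hgt]
    apply ih
    · exact h0
    · exact hlow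
    · exact Or.inr ⟨by omega, by omega, ⟨hmlen, by rw [hbm]; exact not_le.mp hgt⟩⟩
  | case3 start end_ value h mid hget =>
    intro h0 hlow hval
    exfalso
    have hmid := PySem.Int.floordiv_two_mid_bounds (lo := start) (hi := end_) h
    have hend : end_ ≤ (bs.length : Int) - 1 := by
      rcases hval with ⟨_, h1⟩ | ⟨h2a, h2b, ⟨hv, _⟩⟩ <;> omega
    rw [PySem.List.pyGet?_of_nonneg bs (by omega : (0:Int) ≤ mid)] at hget
    have := List.getElem?_eq_none_iff.mp hget
    omega
  | case4 start end_ value h =>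
    intro h0 hlow hval
    rw [bsLoop, dif_neg h]
    rcases hval with ⟨hv1, hv2⟩ | ⟨h2a, h2b, ⟨hvlen, hvgt⟩⟩
    · have hnone : bs.findIdx? (fun b => a < b) = none := by
        rw [List.findIdx?_eq_none_iff]
        intro x hx
        obtain ⟨i, hi, rfl⟩ := List.mem_iff_getElem.mp hx
        simpa using not_lt.mpr (hlow i (by omega) hi)
      rw [hnone, hv1]
    · have hval0 : value = start := by omega
      have hsome : bs.findIdx? (fun b => a < b) = some value.toNat := by
        apply findIdx?_first _ _ _ hvlen (by simpa using hvgt)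
        intro i hi hik
        simpa using not_lt.mpr (hlow i (by omega) hi)
      rw [hsome]
      show value = ((value.toNat : Nat) : Int)
      omega

theorem bsLoop_spec (bs : List Int) (a : Int) (hs : bs.Pairwise (· ≤ ·)) :
    bsLoop bs a 0 (bs.length - 1) (-1) =
      (match bs.findIdx? (fun b => a < b) with | some k => (k : Int) | none => -1) := by
  apply bsLoop_inv bs a hs 0 ((bs.length : Int) - 1) (-1) le_rfl
  · intro i hi _; omega
  · exact Or.inl ⟨rfl, rfl⟩

theorem stepA_eq_gstep (s : Int × List Int) (a : Int) (hs : s.2.Pairwise (· ≤ ·)) :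
    stepA s a = gstep s a := by
  unfold stepA gstep
  rw [bsLoop_spec s.2 a hs, remFirst_eq_findIdx]
  cases h : s.2.findIdx? (fun b => a < b) with
  | none => simp
  | some k => simp

theorem solution_spec : Claim_equal_solution := by
  intro A B _
  unfold Spec_solution solution solution_alt
  have hsB : (PySem.List.sorted B (fun x => x) false).Pairwise (· ≤ ·) := by
    simpa using PySem.List.sorted_pairwise (xs := B) (key := fun x => x)
  have hsA : (PySem.List.sorted A (fun x => x) false).Pairwise (· ≤ ·) := by
    simpa using PySem.List.sorted_pairwise (xs := A) (key := fun x => x)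
  have hperm : A.Perm (PySem.List.sorted A (fun x => x) false) :=
    (PySem.List.sorted_perm (xs := A) (key := fun x => x) (rev := false)).symm
  rw [foldl_inv_congr stepA gstep (fun s => s.2.Pairwise (· ≤ ·))
      stepA_eq_gstep gstep_pairwise A _ hsB,
    foldl_perm_inv gstep (fun s => s.2.Pairwise (· ≤ ·)) gstep_comm gstep_pairwise
      hperm _ hsB,
    foldl_gstep_eq_tp _ _ 0 hsA hsB]
  ring
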